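-- pv_equiv track=rewrite | github.com/cxrodgers/ArduFSM | SimpleTrialRelease2/TrialSpeak.py | split_by_trial
-- ===== SOURCE A (Python) =====
-- start_trial_token = 'TRL_START'
--
-- def split_by_trial(lines):
--     """Splits lines from logfile into list of lists by trial.
--
--     Returns: splines, a list of list of lines, each beginning with
--     TRIAL START (which is when the current trial params are determined).
--     """
--     # Find the trial start lines
--     # This could be done in a couple of ways. Which is most efficient?
--     # This method: split by space, check for token in position 1
--     trial_starts = []
--     for nline, line in enumerate(lines):
--         sp_line = line.split()
--         if len(sp_line) > 1 and sp_line[1] == start_trial_token: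
--             trial_starts.append(nline)
--
--     # Now iterate over trial_starts and append the chunks
--     splines = []
--     for nstart in range(len(trial_starts)-1):
--         splines.append(lines[trial_starts[nstart]:trial_starts[nstart+1]])
--
--     # Append the leftovers as the last trial, if there is anything
--     if len(trial_starts) >= 1:
--         splines.append(lines[trial_starts[-1]:])
--
--     return splines
-- ===== SOURCE B (Python) =====
-- start_trial_token = 'TRL_START'
--
-- def split_by_trial(lines):
--     """Single accumulate-while-scanning pass: flush the current chunk at each
--     TRL_START line; lines before the first start are dropped."""
--     splines = []
--     current = None
--     for line in lines:
--         sp_line = line.split()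
--         if len(sp_line) > 1 and sp_line[1] == start_trial_token:
--             if current is not None:
--                 splines.append(current)
--             current = [line]
--         elif current is not None:
--             current.append(line)
--     if current is not None:
--         splines.append(current)
--     return splines
-- ===== Notes on version B (the rewrite author's own statement) =====
-- stated objective: simpler
-- what changed: Replaces the two-phase index-collection-then-slicing (enumerate to find start indices, then slice between consecutive indices) with a single accumulate-while-scanning pass that flushes the current chunk at each trial-start line.
import Mathlib
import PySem

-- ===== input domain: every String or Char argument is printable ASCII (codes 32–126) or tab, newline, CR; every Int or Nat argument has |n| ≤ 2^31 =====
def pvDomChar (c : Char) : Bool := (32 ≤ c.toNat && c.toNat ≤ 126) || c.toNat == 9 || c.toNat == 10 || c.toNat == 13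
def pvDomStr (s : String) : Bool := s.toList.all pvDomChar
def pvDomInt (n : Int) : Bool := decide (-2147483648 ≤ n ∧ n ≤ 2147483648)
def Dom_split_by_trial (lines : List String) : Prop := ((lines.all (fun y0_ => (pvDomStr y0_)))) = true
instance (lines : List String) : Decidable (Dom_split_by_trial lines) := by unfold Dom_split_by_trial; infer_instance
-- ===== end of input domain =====

-- B replaces A's two-phase index-collection-then-slicing with a single accumulate-while-scanning pass (simpler; same O(n) cost).

-- shared helper: the trial-start test both Pythons perform (line.split(); len(sp) > 1 and sp[1] == 'TRL_START')
def pvIsStart (line : String) : Bool :=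
  let sp_line := PySem.Str.split₀ line
  decide (1 < sp_line.length) && (PySem.List.pyGetD sp_line 1 "" == "TRL_START")

-- ===== PORT A =====
def split_by_trial (lines : List String) : List (List String) :=
  let trial_starts : List Int :=
    (PySem.List.enumerate lines).foldl
      (fun acc p => if pvIsStart p.2 then acc ++ [p.1] else acc) []
  let splines : List (List String) :=
    (PySem.List.pyRange 0 ((trial_starts.length : Int) - 1)).foldl
      (fun acc nstart => acc ++ [PySem.List.slice lines
          (some (PySem.List.pyGetD trial_starts nstart 0))
          (some (PySem.List.pyGetD trial_starts (nstart + 1) 0))]) []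
  if 1 ≤ trial_starts.length then
    splines ++ [PySem.List.slice lines (some (PySem.List.pyGetD trial_starts (-1) 0)) none]
  else splines

-- ===== PORT B =====
def split_by_trial_alt (lines : List String) : List (List String) :=
  let st : List (List String) × Option (List String) :=
    lines.foldl
      (fun st line =>
        if pvIsStart line then
          match st.2 with
          | some c => (st.1 ++ [c], some [line])
          | none   => (st.1, some [line])
        else
          match st.2 with
          | some c => (st.1, some (c ++ [line]))
          | none   => st)
      ([], none)
  match st.2 with
  | some c => st.1 ++ [c]
  | none   => st.1

-- ===== PRECONDITION & SPEC =====
def Spec_split_by_trial (lines : List String) (out : List (List String)) : Prop := out = split_by_trial_alt lines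
instance (lines : List String) (out : List (List String)) : Decidable (Spec_split_by_trial lines out) := by unfold Spec_split_by_trial; infer_instance

-- ===== CLAIM (what is proved, stated in full; the proofs are below) =====
def Claim_equal_split_by_trial : Prop := ∀ (lines : List String), Dom_split_by_trial lines → Spec_split_by_trial lines (split_by_trial lines)

-- ===== LEMMAS AND PROOFS =====

-- common functional description: a chunk opens at each trial-start line, pre-start lines are dropped
def pvChunks : List String → List (List String)
  | [] => []
  | l :: r => if pvIsStart l then (l :: r.takeWhile (fun x => !pvIsStart x)) :: pvChunks r else pvChunks r

-- the 0-based positions of the trial-start lines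
def startsNat : List String → List Nat
  | [] => []
  | l :: r => if pvIsStart l then 0 :: (startsNat r).map (· + 1) else (startsNat r).map (· + 1)

-- A's slicing phase, written over Nat positions
def chunksOf (lines : List String) (ts : List Nat) : List (List String) :=
  match ts with
  | [] => []
  | _ :: _ =>
    (ts.zip ts.tail).map (fun p => List.take (p.2 - p.1) (List.drop p.1 lines))
      ++ [lines.drop (ts.getD (ts.length - 1) 0)]

lemma startsA (lines : List String) : ∀ (s : Int) (acc : List Int),
    (PySem.List.enumerate lines s).foldl (fun acc p => if pvIsStart p.2 then acc ++ [p.1] else acc) acc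
      = acc ++ List.map (fun n : Nat => (n : Int) + s) (startsNat lines) := by
  induction lines with
  | nil => intro s acc; simp [PySem.List.enumerate, startsNat]
  | cons l r ih =>
    intro s acc
    by_cases h : pvIsStart l
    · simp only [PySem.List.enumerate, List.foldl_cons, startsNat, h, if_true, List.map_cons,
        List.map_map, Nat.cast_zero, zero_add, ih (s+1), List.append_assoc, List.singleton_append]
      congr 2
      apply List.map_congr_left; intro n _; simp only [Function.comp_apply]; push_cast; ring
    · simp only [PySem.List.enumerate, List.foldl_cons, startsNat, h, if_false, Bool.false_eq_true,
        List.map_map, ih (s+1)]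
      congr 1
      apply List.map_congr_left; intro n _; simp only [Function.comp_apply]; push_cast; ring

lemma noStarts (xs : List String) (h : startsNat xs = []) :
    pvChunks xs = [] ∧ xs.takeWhile (fun x => !pvIsStart x) = xs := by
  induction xs with
  | nil => simp [pvChunks]
  | cons l r ih =>
    simp only [startsNat] at h
    by_cases hl : pvIsStart l
    · simp [hl] at h
    · simp only [hl, if_false, Bool.false_eq_true] at h
      have hr := ih (by simpa using h)
      simp [pvChunks, hl, hr.1, hr.2]

lemma firstStart (xs : List String) : ∀ (t0 : Nat) (tl : List Nat), startsNat xs = t0 :: tl →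
    xs.takeWhile (fun x => !pvIsStart x) = xs.take t0 := by
  induction xs with
  | nil => intro t0 tl h; simp [startsNat] at h
  | cons l r ih =>
    intro t0 tl h
    simp only [startsNat] at h
    by_cases hl : pvIsStart l
    · simp only [hl, if_true] at h
      obtain ⟨h0, _⟩ := List.cons.inj h
      simp [hl, ← h0]
    · simp only [hl, if_false, Bool.false_eq_true] at h
      rcases hs : startsNat r with _ | ⟨t0', tl'⟩
      · rw [hs] at h; simp at h
      · rw [hs] at h; simp at h
        obtain ⟨h0, _⟩ := h
        simp [hl, ← h0, ih t0' tl' hs]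

lemma shiftChunks (l : String) (r : List String) (ts : List Nat) :
    chunksOf (l :: r) (ts.map (· + 1)) = chunksOf r ts := by
  cases ts with
  | nil => rfl
  | cons t0 tl =>
    simp only [chunksOf, List.map_cons, List.tail_cons, List.length_cons, List.length_map,
      Nat.add_sub_cancel]
    have e1 : ((t0 + 1) :: List.map (fun x => x + 1) tl) = List.map (fun x => x + 1) (t0 :: tl) := rfl
    rw [e1, List.zip_map, List.map_map]
    congr 1
    · apply List.map_congr_left
      intro p _
      simp only [Function.comp_apply, Prod.map_fst, Prod.map_snd]
      rw [List.drop_succ_cons, Nat.add_sub_add_right]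
    · have hlt : tl.length < (t0 :: tl).length := by simp
      rw [List.getD_eq_getElem?_getD, List.getElem?_map, List.getD_eq_getElem?_getD,
        List.getElem?_eq_getElem hlt]
      simp [List.drop_succ_cons]

lemma B_inv (xs : List String) : ∀ (res : List (List String)) (cur : Option (List String)),
    (let st := xs.foldl
      (fun st line =>
        if pvIsStart line then
          match st.2 with
          | some c => (st.1 ++ [c], some [line])
          | none   => (st.1, some [line])
        else
          match st.2 with
          | some c => (st.1, some (c ++ [line]))
          | none   => st)
      (res, cur)
    match st.2 with
    | some c => st.1 ++ [c]
    | none   => st.1)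
    = (match cur with
       | some c => res ++ [c ++ xs.takeWhile (fun x => !pvIsStart x)] ++ pvChunks xs
       | none   => res ++ pvChunks xs) := by
  induction xs with
  | nil => intro res cur; cases cur <;> simp [pvChunks]
  | cons l r ih =>
    intro res cur
    by_cases h : pvIsStart l
    · cases cur with
      | none =>
        simp only [List.foldl_cons, h, if_true]
        rw [ih]
        simp [pvChunks, h]
      | some c =>
        simp only [List.foldl_cons, h, if_true]
        rw [ih]
        simp [pvChunks, h]
    · cases cur with
      | none =>
        simp only [List.foldl_cons, h, if_false, Bool.false_eq_true]
        rw [ih]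
        simp [pvChunks, h]
      | some c =>
        simp only [List.foldl_cons, h, if_false, Bool.false_eq_true]
        rw [ih]
        simp [pvChunks, h]

lemma B_eq (lines : List String) : split_by_trial_alt lines = pvChunks lines := by
  unfold split_by_trial_alt
  have h := B_inv lines [] none
  simp only [List.nil_append] at h
  exact h

lemma rangeZip (g : Nat → Nat → List String) (ts : List Nat) :
    (List.range (ts.length - 1)).map (fun k => g (ts.getD k 0) (ts.getD (k + 1) 0))
      = (ts.zip ts.tail).map (fun p => g p.1 p.2) := by
  apply List.ext_getElem
  · simp [List.length_zip]
  · intro i h1 h2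
    simp only [List.getElem_map, List.getElem_range, List.getElem_zip]
    have hlen : i < ts.length - 1 := by simpa using h1
    have hi : i < ts.length := by omega
    have hi1 : i + 1 < ts.length := by omega
    have htl : i < ts.tail.length := by simp [List.length_tail]; omega
    rw [List.getD_eq_getElem ts 0 hi, List.getD_eq_getElem ts 0 hi1, List.getElem_tail]

lemma pyGetD_neg_one {α : Type} (xs : List α) (d : α) (h : xs ≠ []) :
    PySem.List.pyGetD xs (-1) d = xs.getD (xs.length - 1) d := by
  have hlen : 0 < xs.length := List.length_pos_iff.mpr h
  simp only [PySem.List.pyGetD, PySem.List.pyGet?, PySem.List.pyIdx?]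
  have h1 : ¬ (0:Int) ≤ -1 := by omega
  have h2 : -(xs.length : Int) ≤ -1 := by omega
  simp only [h1, if_false, h2, if_true]
  have h3 : xs.length - ((1:Int)).toNat = xs.length - 1 := by omega
  rw [show (-(-1:Int)) = (1:Int) from rfl, h3]
  have h4 : xs.length - 1 < xs.length := by omega
  simp only [Option.bind_some]
  rw [List.getElem?_eq_getElem h4, List.getD_eq_getElem xs d h4]
  rfl

lemma chunksOf_starts (lines : List String) :
    chunksOf lines (startsNat lines) = pvChunks lines := by
  induction lines with
  | nil => rfl
  | cons l r ih =>
    by_cases h : pvIsStart l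
    · simp only [startsNat, h, if_true, pvChunks]
      rcases hs : startsNat r with _ | ⟨t0, tl⟩
      · obtain ⟨hc, ht⟩ := noStarts r hs
        rw [hs] at *
        simp [chunksOf, hc, ht]
      · have ht := firstStart r t0 tl hs
        have hshift : chunksOf (l :: r) ((t0 :: tl).map (· + 1)) = chunksOf r (t0 :: tl) :=
          shiftChunks l r (t0 :: tl)
        rw [hs] at ih
        rw [← ih, ← hshift, ht]
        simp only [chunksOf, List.map_cons, List.zip_cons_cons, List.tail_cons, List.length_cons,
          List.length_map, Nat.add_sub_cancel, List.map_cons]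
        rw [List.cons_append]
        show _ :: _ = _ :: _
        congr 1
    · simp only [startsNat, h, if_false, Bool.false_eq_true, pvChunks]
      rw [shiftChunks]
      exact ih

lemma A_eq (lines : List String) : split_by_trial lines = chunksOf lines (startsNat lines) := by
  unfold split_by_trial
  have hT : (PySem.List.enumerate lines).foldl
      (fun acc p => if pvIsStart p.2 then acc ++ [p.1] else acc) ([] : List Int)
      = (startsNat lines).map (fun n : Nat => (n : Int)) := by
    rw [startsA lines 0 []]
    simp
  rw [hT]
  dsimp only
  rcases hs : startsNat lines with _ | ⟨t0, tl⟩
  · simp [chunksOf]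
  · set ts : List Nat := t0 :: tl with hts
    have hlen : ((ts.map (fun n : Nat => (n : Int))).length : Int) - 1 = ((ts.length - 1 : Nat) : Int) := by
      simp only [List.length_map, hts, List.length_cons]
      push_cast
      omega
    rw [hlen, PySem.List.pyRange_zero_natCast, PySem.List.foldl_append_singleton_eq_map,
      List.map_map, List.nil_append]
    have hmap : ∀ k ∈ List.range (ts.length - 1),
        ((fun nstart => PySem.List.slice lines
            (some (PySem.List.pyGetD (ts.map (fun n : Nat => (n : Int))) nstart 0))
            (some (PySem.List.pyGetD (ts.map (fun n : Nat => (n : Int))) (nstart + 1) 0)))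
          ∘ (fun k : Nat => (k : Int))) k
        = List.take ((ts.getD (k+1) 0) - (ts.getD k 0)) (List.drop (ts.getD k 0) lines) := by
      intro k hk
      simp only [Function.comp_apply]
      rw [show ((0:Int)) = ((0:Nat) : Int) from rfl,
        PySem.List.pyGetD_map (fun n : Nat => (n : Int)) ts _ 0,
        show ((k : Int) + 1) = ((k + 1 : Nat) : Int) from by push_cast; ring,
        PySem.List.pyGetD_map (fun n : Nat => (n : Int)) ts _ 0,
        PySem.List.pyGetD_natCast, PySem.List.pyGetD_natCast, PySem.List.slice_natCast]
    rw [List.map_congr_left hmap, rangeZip (fun a b => List.take (b - a) (List.drop a lines)) ts]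
    have hmem : 1 ≤ (ts.map (fun n : Nat => (n : Int))).length := by simp [hts]
    rw [if_pos hmem]
    have hne : ts ≠ [] := by simp [hts]
    have hlast : PySem.List.pyGetD (ts.map (fun n : Nat => (n : Int))) (-1) 0
        = ((ts.getD (ts.length - 1) 0 : Nat) : Int) := by
      rw [show ((0:Int)) = ((0:Nat) : Int) from rfl,
        PySem.List.pyGetD_map (fun n : Nat => (n : Int)) ts (-1) 0,
        pyGetD_neg_one ts 0 hne]
    rw [hlast, PySem.List.slice_from lines (by positivity)]
    simp only [Int.toNat_natCast]
    rfl

-- ===== VERDICT (by name: the statement is the Claim_ definition above) =====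
theorem split_by_trial_spec : Claim_equal_split_by_trial := by
  intro lines _
  show _ = _
  rw [A_eq, chunksOf_starts, B_eq]
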